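-- pv_equiv track=rewrite | github.com/MYRon-TO/pin_xie | src/pin_xie/template.py | compress_variable_slots
-- ===== SOURCE A (Python) =====
-- TemplateToken = str | None
--
-- def _append_variable_slot(tokens: list[TemplateToken]) -> None:
--     if not tokens or tokens[-1] is not None:
--         tokens.append(None)
--
-- def compress_variable_slots(tokens: list[TemplateToken]) -> list[TemplateToken]:
--     merged: list[TemplateToken] = []
--     for token in tokens:
--         if token is None:
--             _append_variable_slot(merged)
--         else:
--             merged.append(token)
--     return merged
-- ===== SOURCE B (Python) =====
-- from itertools import groupby
--
-- def compress_variable_slots(tokens):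
--     merged = []
--     for is_slot, group in groupby(tokens, key=lambda t: t is None):
--         if is_slot:
--             merged.append(None)
--         else:
--             merged.extend(group)
--     return merged
-- ===== Notes on version B (the rewrite author's own statement) =====
-- stated objective: idiomatic
-- what changed: Replaces the per-token tail-inspection state machine with itertools.groupby run-based grouping: one None per None-run, all tokens per non-None run.
import Mathlib
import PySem

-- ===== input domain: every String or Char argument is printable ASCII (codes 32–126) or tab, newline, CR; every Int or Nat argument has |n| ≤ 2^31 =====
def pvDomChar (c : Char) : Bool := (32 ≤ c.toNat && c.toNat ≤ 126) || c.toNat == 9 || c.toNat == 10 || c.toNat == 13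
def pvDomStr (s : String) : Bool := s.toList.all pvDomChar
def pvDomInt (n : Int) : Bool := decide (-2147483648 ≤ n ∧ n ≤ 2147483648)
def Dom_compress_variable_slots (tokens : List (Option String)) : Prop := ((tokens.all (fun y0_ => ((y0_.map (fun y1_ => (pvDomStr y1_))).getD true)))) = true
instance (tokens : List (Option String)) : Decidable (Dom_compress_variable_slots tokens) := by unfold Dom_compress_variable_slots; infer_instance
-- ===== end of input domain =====

-- B collapses None-runs via run-based grouping (groupby) instead of A's tail-inspection state machine; objective: idiomatic.

-- ===== PORT A =====
-- _append_variable_slot: appends None unless the list is nonempty and ends in None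
def pv_append_variable_slot (merged : List (Option String)) : List (Option String) :=
  if merged = [] ∨ merged.getLast? ≠ some none then merged ++ [none] else merged

def compress_variable_slots (tokens : List (Option String)) : List (Option String) :=
  tokens.foldl (fun merged token =>
    match token with
    | none => pv_append_variable_slot merged
    | some s => merged ++ [some s]) []

-- ===== PORT B =====
-- groupby over the key (t is None): a None-run contributes one None, a non-None run all its tokens;
-- ported as recursion on the run structure (dropWhile skips the rest of a None-run).
def compress_variable_slots_alt (tokens : List (Option String)) : List (Option String) :=
  match tokens with
  | [] => []
  | none :: rest => none :: compress_variable_slots_alt (rest.dropWhile Option.isNone)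
  | some s :: rest => some s :: compress_variable_slots_alt rest
termination_by tokens.length
decreasing_by
  · exact Nat.lt_succ_of_le (List.length_dropWhile_le _ _)
  · simp

-- ===== PRECONDITION & SPEC =====
def Spec_compress_variable_slots (tokens : List (Option String)) (out : List (Option String)) : Prop := out = compress_variable_slots_alt tokens
instance (tokens : List (Option String)) (out : List (Option String)) : Decidable (Spec_compress_variable_slots tokens out) := by unfold Spec_compress_variable_slots; infer_instance

-- ===== CLAIM (what is proved, stated in full; the proofs are below) =====
def Claim_equal_compress_variable_slots : Prop := ∀ (tokens : List (Option String)), Dom_compress_variable_slots tokens → Spec_compress_variable_slots tokens (compress_variable_slots tokens)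

-- ===== LEMMAS AND PROOFS =====

-- collapse with an explicit "last emitted was None" flag
def pvGB (ts : List (Option String)) (flag : Bool) : List (Option String) :=
  match ts, flag with
  | [], _ => []
  | none :: rest, true => pvGB rest true
  | none :: rest, false => none :: pvGB rest true
  | some s :: rest, _ => some s :: pvGB rest false

lemma pvGB_dropWhile (ts : List (Option String)) (b : Bool) :
    pvGB ts true = pvGB (ts.dropWhile Option.isNone) b := by
  induction ts with
  | nil => cases b <;> simp [pvGB]
  | cons h t ih =>
    cases h with
    | none => simpa [pvGB, List.dropWhile, Option.isNone] using ih
    | some s => cases b <;> simp [pvGB, List.dropWhile, Option.isNone]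

lemma alt_eq_pvGB (ts : List (Option String)) :
    compress_variable_slots_alt ts = pvGB ts false := by
  induction ts using compress_variable_slots_alt.induct with
  | case1 => simp [compress_variable_slots_alt, pvGB]
  | case2 rest ih =>
      rw [compress_variable_slots_alt, ih, pvGB, ← pvGB_dropWhile]
  | case3 s rest ih =>
      rw [compress_variable_slots_alt, ih, pvGB]

lemma foldl_eq_append_pvGB (ts : List (Option String)) (acc : List (Option String)) :
    ts.foldl (fun merged token =>
      match token with
      | none => pv_append_variable_slot merged
      | some s => merged ++ [some s]) acc
    = acc ++ pvGB ts (decide (acc.getLast? = some none)) := by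
  induction ts generalizing acc with
  | nil => simp [pvGB]
  | cons h t ih =>
    cases h with
    | some s =>
      simp only [List.foldl_cons]
      rw [ih]
      have : (acc ++ [some s]).getLast? = some (some s) := by simp
      simp [this, pvGB]
    | none =>
      simp only [List.foldl_cons]
      by_cases hl : acc.getLast? = some none
      · have hacc : pv_append_variable_slot acc = acc := by
          have : acc ≠ [] := by intro h; simp [h] at hl
          simp [pv_append_variable_slot, this, hl]
        rw [hacc, ih, hl]
        simp [pvGB]
      · have hacc : pv_append_variable_slot acc = acc ++ [none] := by
          simp [pv_append_variable_slot, hl]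
        rw [hacc, ih]
        have : ((acc ++ [none]) : List (Option String)).getLast? = some none := by simp
        simp [this, hl, pvGB]

-- ===== VERDICT (by name: the statement is the Claim_ definition above) =====
theorem compress_variable_slots_spec : Claim_equal_compress_variable_slots := by
  intro tokens _
  unfold Spec_compress_variable_slots compress_variable_slots
  rw [foldl_eq_append_pvGB, alt_eq_pvGB]
  simp
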